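-- pv_equiv track=rewrite | github.com/caihongwei2006/mint-case0 | data_converter.py | split_conversation_to_progressive_samples
-- ===== SOURCE A (Python) =====
-- def split_conversation_to_progressive_samples(messages: list[dict]) -> list[list[dict]]:
--     """
--     将多轮对话拆分为累进式训练样本
--
--     输入: [system, user, assistant1, user, assistant2, user, assistant3, ...]
--     输出: [
--         [system, user, assistant1],                                    # 学习第1次回复
--         [system, user, assistant1, user, assistant2],                  # 学习第2次回复
--         [system, user, assistant1, user, assistant2, user, assistant3], # 学习第3次回复
--         ...
--     ]
--
--     每个样本只训练最后一个 assistant 消息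
--     """
--     if not messages:
--         return []
--
--     samples = []
--     current_context = []
--
--     for msg in messages:
--         current_context.append(msg)
--
--         # 每遇到一个 assistant 消息，生成一个训练样本
--         if msg["role"] == "assistant":
--             samples.append(current_context.copy())
--
--     return samples
-- ===== SOURCE B (Python) =====
-- def split_conversation_to_progressive_samples(messages: list[dict]) -> list[list[dict]]:
--     # Scan BACKWARDS: repeatedly find the previous assistant message and emit the
--     # prefix ending at it; samples are collected last-first and reversed at the end.
--     samples = []
--     j = len(messages)
--     while True:
--         while j > 0 and messages[j - 1]["role"] != "assistant":
--             j -= 1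
--         if j == 0:
--             break
--         samples.append(messages[:j])
--         j -= 1
--     samples.reverse()
--     return samples
-- ===== Notes on version B (the rewrite author's own statement) =====
-- stated objective: alternative
-- what changed: Replaces the forward pass that maintains a growing current_context accumulator with a backward scan that repeatedly locates the previous assistant message, collects the prefix messages[:j] last-first, and reverses the collected list at the end.
import Mathlib
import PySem

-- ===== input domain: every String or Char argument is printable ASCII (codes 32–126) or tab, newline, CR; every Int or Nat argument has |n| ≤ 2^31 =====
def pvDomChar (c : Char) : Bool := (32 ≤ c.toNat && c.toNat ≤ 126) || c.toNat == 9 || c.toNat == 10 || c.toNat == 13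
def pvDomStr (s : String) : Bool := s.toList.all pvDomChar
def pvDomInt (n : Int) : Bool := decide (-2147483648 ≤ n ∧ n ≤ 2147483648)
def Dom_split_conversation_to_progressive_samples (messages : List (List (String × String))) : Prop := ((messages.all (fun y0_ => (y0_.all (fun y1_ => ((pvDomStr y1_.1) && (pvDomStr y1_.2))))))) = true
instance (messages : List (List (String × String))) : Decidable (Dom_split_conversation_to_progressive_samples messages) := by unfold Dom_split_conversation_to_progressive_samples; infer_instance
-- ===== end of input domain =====

-- B replaces A's forward accumulator pass by a backward scan: repeatedly find the previous
-- assistant message, emit the prefix ending at it (last-first), and reverse at the end (alternative).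


-- ===== PORT A =====
-- msg["role"] : first-match association-list lookup (raises KeyError when absent; excluded by Pre_)
def split_conversation_to_progressive_samples (messages : List (List (String × String))) : List (List (List (String × String))) :=
  if messages = [] then []
  else
    (messages.foldl
      (fun (st : List (List (List (String × String))) × List (List (String × String))) msg =>
        let ctx := st.2 ++ [msg]
        (if msg.lookup "role" = some "assistant" then st.1 ++ [ctx] else st.1, ctx))
      ([], [])).1

-- ===== PORT B =====
-- messages[j-1]["role"] for 0 < j ≤ len: in-range indexing via PySem.List.pyGet?, then lookup
def pvRoleAt (messages : List (List (String × String))) (i : Int) : Option String :=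
  (PySem.List.pyGet? messages i).bind (fun m => m.lookup "role")

-- inner `while j > 0 and messages[j-1]["role"] != "assistant": j -= 1`
def pvFindAssistEnd (messages : List (List (String × String))) : Nat → Nat
  | 0 => 0
  | Nat.succ m => if pvRoleAt messages (m : Int) ≠ some "assistant" then pvFindAssistEnd messages m else Nat.succ m

theorem pvFindAssistEnd_le (messages : List (List (String × String))) (j : Nat) :
    pvFindAssistEnd messages j ≤ j := by
  induction j with
  | zero => simp [pvFindAssistEnd]
  | succ m ih => unfold pvFindAssistEnd; split <;> omega

-- outer loop: each iteration appends the prefix messages[:j] (= take j, exact for 0 ≤ j) and steps past it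
def pvCollect (messages : List (List (String × String))) (j : Nat) : List (List (List (String × String))) :=
  let j' := pvFindAssistEnd messages j
  if j' = 0 then [] else messages.take j' :: pvCollect messages (j' - 1)
termination_by j
decreasing_by have := pvFindAssistEnd_le messages j; omega

-- samples are collected last-first, then `samples.reverse()`
def split_conversation_to_progressive_samples_alt (messages : List (List (String × String))) : List (List (List (String × String))) :=
  (pvCollect messages messages.length).reverse

-- ===== PRECONDITION & SPEC =====
-- Pre_: every message carries a "role" key; on a message without one, msg["role"] raises KeyError in A (and in B).
def Pre_split_conversation_to_progressive_samples (messages : List (List (String × String))) : Prop :=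
  ∀ m ∈ messages, (m.lookup "role").isSome = true
instance (messages : List (List (String × String))) : Decidable (Pre_split_conversation_to_progressive_samples messages) := by unfold Pre_split_conversation_to_progressive_samples; infer_instance
def pvWitness_split_conversation_to_progressive_samples : (List (List (String × String))) :=
  [[("role", "user"), ("content", "hi")], [("role", "assistant"), ("content", "hello")]]
def Spec_split_conversation_to_progressive_samples (messages : List (List (String × String))) (out : List (List (List (String × String)))) : Prop := out = split_conversation_to_progressive_samples_alt messages
instance (messages : List (List (String × String))) (out : List (List (List (String × String)))) : Decidable (Spec_split_conversation_to_progressive_samples messages out) := by unfold Spec_split_conversation_to_progressive_samples; infer_instance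

-- ===== CLAIM (what is proved, stated in full; the proofs are below) =====
def Claim_equal_split_conversation_to_progressive_samples : Prop := ∀ (messages : List (List (String × String))), Dom_split_conversation_to_progressive_samples messages → Pre_split_conversation_to_progressive_samples messages → Spec_split_conversation_to_progressive_samples messages (split_conversation_to_progressive_samples messages)

-- ===== LEMMAS AND PROOFS =====

-- canonical description: the prefixes full.take (i+1) for each assistant index i < j, in increasing i
def pvP (full : List (List (String × String))) (i : Nat) : Bool :=
  decide (pvRoleAt full (i : Int) = some "assistant")

def pvTo (full : List (List (String × String))) (j : Nat) : List (List (List (String × String))) :=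
  ((List.range j).filter (pvP full)).map (fun i => full.take (i + 1))

theorem pvFind_pvTo (full : List (List (String × String))) (j : Nat) :
    pvTo full j = pvTo full (pvFindAssistEnd full j) := by
  induction j with
  | zero => simp [pvFindAssistEnd]
  | succ m ih =>
    unfold pvFindAssistEnd
    split_ifs with h
    · rw [← ih]
      simp [pvTo, List.range_succ, List.filter_append, pvP, h]
    · rfl

theorem pvFind_assist (full : List (List (String × String))) (j m : Nat)
    (h : pvFindAssistEnd full j = m + 1) : pvRoleAt full (m : Int) = some "assistant" := by
  induction j with
  | zero => simp [pvFindAssistEnd] at h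
  | succ k ih =>
    unfold pvFindAssistEnd at h
    split at h
    · exact ih h
    · cases h
      by_contra hc
      simp_all

theorem pvCollect_char (full : List (List (String × String))) (j : Nat) :
    pvCollect full j = (pvTo full j).reverse := by
  induction j using Nat.strong_induction_on with
  | _ j ih =>
    rw [pvCollect]
    by_cases h : pvFindAssistEnd full j = 0
    · rw [if_pos h, pvFind_pvTo, h]
      simp [pvTo]
    · obtain ⟨m, hm⟩ := Nat.exists_eq_succ_of_ne_zero h
      have hle := pvFindAssistEnd_le full j
      rw [if_neg h, hm]
      have hrole : pvP full m = true := by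
        simp [pvP, pvFind_assist full j m hm]
      simp only [Nat.succ_sub_one]
      rw [pvFind_pvTo, hm, ih m (by omega)]
      simp [pvTo, Nat.succ_eq_add_one, List.range_succ, List.filter_append, hrole]

-- samples produced while folding A's loop over `rest` with accumulated context `pre`
def pvSamples (pre : List (List (String × String))) : List (List (String × String)) → List (List (List (String × String)))
  | [] => []
  | m :: t =>
    (if m.lookup "role" = some "assistant" then [pre ++ [m]] else []) ++ pvSamples (pre ++ [m]) t

theorem pvFold_char (rest : List (List (String × String)))
    (S : List (List (List (String × String)))) (pre : List (List (String × String))) :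
    (rest.foldl
      (fun (st : List (List (List (String × String))) × List (List (String × String))) msg =>
        let ctx := st.2 ++ [msg]
        (if msg.lookup "role" = some "assistant" then st.1 ++ [ctx] else st.1, ctx))
      (S, pre)).1 = S ++ pvSamples pre rest := by
  induction rest generalizing S pre with
  | nil => simp [pvSamples]
  | cons m t ih =>
    simp only [List.foldl_cons, pvSamples]
    split_ifs with h <;> simp [ih]

theorem pvSamples_char (full : List (List (String × String))) :
    ∀ (t : List (List (String × String))) (k : Nat), full.drop k = t →
    pvSamples (full.take k) t
      = ((List.range' k t.length).filter (pvP full)).map (fun i => full.take (i + 1)) := by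
  intro t
  induction t with
  | nil => intro k _; simp [pvSamples]
  | cons m t' ih =>
    intro k hk
    have hklen : k < full.length := by
      by_contra hge
      simp [List.drop_eq_nil_of_le (Nat.le_of_not_lt hge)] at hk
    have hm : full[k] = m := by
      have := congrArg (fun l => l.head?) hk
      simpa [List.head?_drop, List.getElem?_eq_getElem hklen] using this
    have hdrop : full.drop (k + 1) = t' := by
      have := congrArg List.tail hk
      simpa [List.tail_drop] using this
    have htake : full.take (k + 1) = full.take k ++ [m] := by
      rw [List.take_add_one, List.getElem?_eq_getElem hklen, hm]; rfl
    have hp : pvP full k = decide (m.lookup "role" = some "assistant") := by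
      simp [pvP, pvRoleAt, PySem.List.pyGet?_natCast, List.getElem?_eq_getElem hklen, hm]
    have hrest := ih (k + 1) hdrop
    rw [htake] at hrest
    simp only [pvSamples, List.length_cons, List.range'_succ, List.filter_cons, hp]
    by_cases h : List.lookup "role" m = some "assistant"
    · simp [h, hrest, htake]
    · simp [h, hrest]

theorem pv_ports_eq (messages : List (List (String × String))) :
    split_conversation_to_progressive_samples messages = split_conversation_to_progressive_samples_alt messages := by
  unfold split_conversation_to_progressive_samples split_conversation_to_progressive_samples_alt
  rw [pvCollect_char, List.reverse_reverse]
  have hchar : pvSamples [] messages = pvTo messages messages.length := by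
    have := pvSamples_char messages messages 0 (by simp)
    simpa [pvTo, List.range_eq_range'] using this
  rcases messages with _ | ⟨m, t⟩
  · simp [pvTo]
  · rw [if_neg (by simp), pvFold_char]
    simpa using hchar

-- ===== VERDICT (by name: the statement is the Claim_ definition above) =====
theorem split_conversation_to_progressive_samples_spec : Claim_equal_split_conversation_to_progressive_samples := by
  intro messages _ _
  exact pv_ports_eq messages
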